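-- pv_equiv track=rewrite | github.com/Gabo666/Kakuro | juego_mejora.py | Revisar_String
-- ===== SOURCE A (Python) =====
-- def Revisar_String(string):
--     """Función que revisa un string. Se utiliza para revisar las claves.
--     Si la clave es doble, su salida va a ser una tupla con el valor del
--     número antes y despues del "\"."""
--     cont=0
--     num1=""
--     num2=""
--     slash=False
--
--     #Colocar todos los elementos que puedan ser convertidos en enteros en un lado
--     #de la tupla hasta encontrar un elemento que no pueda ser convertido en entero.
--     #Todos los valores despues de este van a ser el segundo valor de la tupla.
--     while cont!=len(string):
--         dig=string[cont]
--         try: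
--             dig=int(dig)
--             if slash==False:
--                 num1+=str(dig)
--             else:
--                 num2+=str(dig)
--         except:
--             slash=True
--         cont+=1
--     if num1=="":
--         num1=0
--     if num2=="":
--         num2=0
--     return int(num1),int(num2)
-- ===== SOURCE B (Python) =====
-- def Revisar_String(string):
--     # Three-stage text pipeline instead of a stateful scan:
--     # 1) mask every non-digit to a space, 2) partition at the first space
--     #    (= the first non-digit), 3) delete the remaining spaces in the tail.
--     masked = ''.join(c if '0' <= c <= '9' else ' ' for c in string)
--     head, _sep, tail = masked.partition(' ')
--     num2 = tail.replace(' ', '')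
--     return (int(head) if head else 0, int(num2) if num2 else 0)
-- ===== Notes on version B (the rewrite author's own statement) =====
-- stated objective: faster
-- what changed: Replaces A's stateful while-loop (slash flag, try/except per character, per-character string concatenation) by a staged text pipeline: mask every non-digit to a space, partition the masked string at its first space, and delete the spaces left in the tail; on the ASCII domain int(c) succeeds exactly for the decimal digit characters.
import Mathlib
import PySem

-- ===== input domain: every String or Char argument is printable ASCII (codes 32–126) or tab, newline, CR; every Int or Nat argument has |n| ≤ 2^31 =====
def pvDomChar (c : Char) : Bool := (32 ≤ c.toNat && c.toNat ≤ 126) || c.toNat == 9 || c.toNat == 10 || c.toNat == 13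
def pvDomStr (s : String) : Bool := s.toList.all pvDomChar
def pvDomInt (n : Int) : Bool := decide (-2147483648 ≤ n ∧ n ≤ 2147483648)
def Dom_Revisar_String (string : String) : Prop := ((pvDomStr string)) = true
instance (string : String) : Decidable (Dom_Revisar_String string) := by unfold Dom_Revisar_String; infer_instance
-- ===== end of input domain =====

-- B replaces A's stateful flagged character scan by a staged text pipeline
-- (mask non-digits to spaces, partition at the first space, delete spaces in
-- the tail); objective: a different decomposition, measurably faster in the
-- timing run (no try/except and no per-character concatenation).

-- On the printable-ASCII domain `int(c)` for a single character c succeeds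
-- exactly when c is a decimal digit character; both Pythons use that
-- criterion (A via try/int, B by a direct range test), ported as this
-- shared predicate.
def pvIsDig (c : Char) : Bool := decide ('0' ≤ c) && decide (c ≤ '9')

-- ===== PORT A =====
-- A's while loop over indices, ported as structural recursion over the
-- character list with the same state (num1, num2, slash).  When int(dig)
-- succeeds, num += str(int(dig)) appends that same digit character.
def pvLoopA : List Char → List Char → List Char → Bool → List Char × List Char
  | [], num1, num2, _ => (num1, num2)
  | c :: rest, num1, num2, slash =>
      if pvIsDig c then
        if slash = false then pvLoopA rest (num1 ++ [c]) num2 slash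
        else pvLoopA rest num1 (num2 ++ [c]) slash
      else pvLoopA rest num1 num2 true

-- int(num1) with the `if num1 == "": num1 = 0` default (int(0) = 0)
def pvFinA (l : List Char) : Int :=
  if l = [] then 0 else (PySem.Int.ofStr? (String.mk l)).getD 0

def Revisar_String (string : String) : Int × Int :=
  let r := pvLoopA string.toList [] [] false
  (pvFinA r.1, pvFinA r.2)

-- ===== PORT B =====
def Revisar_String_alt (string : String) : Int × Int :=
  -- masked = ''.join(c if digit else ' ' for c in string)
  let masked := string.toList.map (fun c => if pvIsDig c then c else ' ')
  -- head, _sep, tail = masked.partition(' ')  — hand port, exact for a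
  -- single-character separator: head = chars before the first ' ', tail = rest
  let head := masked.takeWhile (fun c => c ≠ ' ')
  let tail := (masked.dropWhile (fun c => c ≠ ' ')).drop 1
  -- num2 = tail.replace(' ', '')  — hand port, exact: deletes every ' '
  let num2 := tail.filter (fun c => c ≠ ' ')
  (if head = [] then 0 else (PySem.Int.ofStr? (String.mk head)).getD 0,
   if num2 = [] then 0 else (PySem.Int.ofStr? (String.mk num2)).getD 0)

-- ===== PRECONDITION & SPEC =====
def Spec_Revisar_String (string : String) (out : Int × Int) : Prop := out = Revisar_String_alt string
instance (string : String) (out : Int × Int) : Decidable (Spec_Revisar_String string out) := by unfold Spec_Revisar_String; infer_instance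

-- ===== CLAIM =====
def Claim_equal_Revisar_String : Prop := ∀ (string : String), Dom_Revisar_String string → Spec_Revisar_String string (Revisar_String string)

-- ===== LEMMAS AND PROOFS =====

theorem pvIsDig_ne_space {c : Char} (h : pvIsDig c = true) : c ≠ ' ' := by
  intro e; subst e; exact absurd h (by decide)

-- after the slash is set, A's loop appends exactly the remaining digits to num2
theorem pvLoopA_slash (cs : List Char) : ∀ n1 n2,
    pvLoopA cs n1 n2 true = (n1, n2 ++ cs.filter (fun c => pvIsDig c)) := by
  induction cs with
  | nil => intro n1 n2; simp [pvLoopA]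
  | cons c rest ih =>
      intro n1 n2
      by_cases h : pvIsDig c <;> simp [pvLoopA, h, ih]

-- before the slash, A's loop accumulates the leading digits into num1; the
-- first non-digit flips the flag, so num2 collects the digits after it
theorem pvLoopA_main (cs : List Char) : ∀ n1,
    pvLoopA cs n1 [] false =
      (n1 ++ cs.take (cs.findIdx (fun c => !pvIsDig c)),
       (cs.drop (cs.findIdx (fun c => !pvIsDig c) + 1)).filter (fun c => pvIsDig c)) := by
  induction cs with
  | nil => intro n1; simp [pvLoopA]
  | cons c rest ih =>
      intro n1
      by_cases h : pvIsDig c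
      · simp [pvLoopA, h, ih, List.findIdx_cons, List.take_succ_cons]
      · simp [pvLoopA, h, pvLoopA_slash, List.findIdx_cons]

-- B-side: the head of the partition of the masked string is the leading digits
theorem pvMask_takeWhile (cs : List Char) :
    (cs.map (fun c => if pvIsDig c then c else ' ')).takeWhile (fun c => c ≠ ' ') =
      cs.take (cs.findIdx (fun c => !pvIsDig c)) := by
  induction cs with
  | nil => simp
  | cons c rest ih =>
      by_cases h : pvIsDig c
      · simp [h, pvIsDig_ne_space h, List.findIdx_cons, List.take_succ_cons]
        simpa using ih
      · simp [h, List.findIdx_cons]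

-- B-side: dropping up to the first space of the masked string drops the leading digits
theorem pvMask_dropWhile (cs : List Char) :
    (cs.map (fun c => if pvIsDig c then c else ' ')).dropWhile (fun c => c ≠ ' ') =
      (cs.drop (cs.findIdx (fun c => !pvIsDig c))).map (fun c => if pvIsDig c then c else ' ') := by
  induction cs with
  | nil => simp
  | cons c rest ih =>
      by_cases h : pvIsDig c
      · simp [h, pvIsDig_ne_space h, List.findIdx_cons]
        simpa using ih
      · simp [h, List.findIdx_cons]

-- B-side: deleting the spaces of a masked list keeps exactly its digits
theorem pvMask_filter (l : List Char) :
    (l.map (fun c => if pvIsDig c then c else ' ')).filter (fun c => c ≠ ' ') =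
      l.filter (fun c => pvIsDig c) := by
  induction l with
  | nil => simp
  | cons c rest ih =>
      by_cases h : pvIsDig c
      · simp [h, pvIsDig_ne_space h]
        simpa using ih
      · simp [h]
        simpa using ih

-- ===== VERDICT =====
theorem Revisar_String_spec : Claim_equal_Revisar_String := by
  intro s _
  unfold Spec_Revisar_String Revisar_String Revisar_String_alt
  simp only [pvLoopA_main, pvMask_takeWhile, pvMask_dropWhile, ← List.map_drop,
    List.drop_drop, pvMask_filter, pvFinA]
  simp [Nat.add_comm]
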